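-- pv_equiv track=rewrite | github.com/wideyard/Img_generate | scores_gen.py | generate_pitches_for_key
-- ===== SOURCE A (Python) =====
-- def generate_pitches_for_key(key_note, key_mode):
--     key_signatures = {
--         ('c', '\\major'): {}, ('g', '\\major'): {'f': 'fis'}, ('d', '\\major'): {'f': 'fis', 'c': 'cis'},
--         ('a', '\\major'): {'f': 'fis', 'c': 'cis', 'g': 'gis'},
--         ('f', '\\major'): {'b': 'bes'}, ('bes', '\\major'): {'b': 'bes', 'e': 'ees'},
--         ('ees', '\\major'): {'b': 'bes', 'e': 'ees', 'a': 'aes'},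
--         ('e', '\\major'): {'f': 'fis', 'c': 'cis', 'g': 'gis', 'd': 'dis'},
--         ('a', '\\minor'): {}, ('e', '\\minor'): {'f': 'fis'}, ('b', '\\minor'): {'f': 'fis', 'c': 'cis'},
--         ('fis', '\\minor'): {'f': 'fis', 'c': 'cis', 'g': 'gis'},
--         ('d', '\\minor'): {'b': 'bes'}, ('g', '\\minor'): {'b': 'bes', 'e': 'ees'},
--         ('c', '\\minor'): {'b': 'bes', 'e': 'ees', 'a': 'aes'},
--         ('cis', '\\minor'): {'f': 'fis', 'c': 'cis', 'g': 'gis', 'd': 'dis'},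
--     }
--
--     accidentals = key_signatures.get((key_note, key_mode), {})
--
--     base_notes = ['c', 'd', 'e', 'f', 'g', 'a', 'b']
--     all_pitches = []
--
--     for note in ['e', 'f', 'g', 'a', 'b']:
--         all_pitches.append(accidentals.get(note, note) + ",")
--
--     for octave_mark in ["", "'"]:
--         for note in base_notes:
--             all_pitches.append(accidentals.get(note, note) + octave_mark)
--
--     for note in ['c', 'd', 'e', 'f', 'g', 'a', 'b']:
--         all_pitches.append(accidentals.get(note, note) + "''")
--
--     diatonic_map = {n: n for n in base_notes}
--     for natural_note, accidental_note in accidentals.items():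
--         diatonic_map[natural_note] = accidental_note
--
--     all_pitches = []
--     octave_marks = [",", "", "'", "''"]
--     base_notes_in_order = ["c", "d", "e", "f", "g", "a", "b"]
--
--     for mark in octave_marks:
--         for note in base_notes_in_order:
--             pitch = diatonic_map.get(note, note) + mark
--             all_pitches.append(pitch)
--
--     start_index = all_pitches.index(diatonic_map['e'] + ",")
--     end_index = all_pitches.index(diatonic_map['a'] + "''")
--
--     return all_pitches[start_index : end_index + 1]
-- ===== SOURCE B (Python) =====
-- def generate_pitches_for_key(key_note, key_mode):
--     # Circle of fifths: signed accidental count per key (positive = sharps, negative = flats).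
--     counts = {
--         ('c', '\\major'): 0, ('g', '\\major'): 1, ('d', '\\major'): 2, ('a', '\\major'): 3,
--         ('e', '\\major'): 4, ('f', '\\major'): -1, ('bes', '\\major'): -2, ('ees', '\\major'): -3,
--         ('a', '\\minor'): 0, ('e', '\\minor'): 1, ('b', '\\minor'): 2, ('fis', '\\minor'): 3,
--         ('cis', '\\minor'): 4, ('d', '\\minor'): -1, ('g', '\\minor'): -2, ('c', '\\minor'): -3,
--     }
--     k = counts.get((key_note, key_mode), 0)
--     sharps = ["f", "c", "g", "d", "a", "e", "b"][:k] if k > 0 else []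
--     flats = ["b", "e", "a", "d", "g"][:-k] if k < 0 else []
--
--     def spell(n):
--         if n in sharps:
--             return n + "is"
--         if n in flats:
--             return n + "es"
--         return n
--
--     notes = ["c", "d", "e", "f", "g", "a", "b"]
--     marks = [",", "", "'", "''"]
--     # Pitch i (in the 28-slot c,..b'' grid) is notes[i % 7] + marks[i // 7]; the range e,..a'' is i = 2..26.
--     return [spell(notes[i % 7]) + marks[i // 7] for i in range(2, 27)]
-- ===== Notes on version B (the rewrite author's own statement) =====
-- stated objective: simpler
-- what changed: B replaces A's per-key accidental dictionaries, dead list-building block, diatonic_map rebuild, full 28-pitch table and .index/slice search by a circle-of-fifths signed count per key, spelling accidentals by appending 'is'/'es' to a prefix of the sharps/flats orders, and emitting the e,..a'' range directly as notes[i%7]+marks[i//7] for i in range(2,27).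
import Mathlib
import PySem

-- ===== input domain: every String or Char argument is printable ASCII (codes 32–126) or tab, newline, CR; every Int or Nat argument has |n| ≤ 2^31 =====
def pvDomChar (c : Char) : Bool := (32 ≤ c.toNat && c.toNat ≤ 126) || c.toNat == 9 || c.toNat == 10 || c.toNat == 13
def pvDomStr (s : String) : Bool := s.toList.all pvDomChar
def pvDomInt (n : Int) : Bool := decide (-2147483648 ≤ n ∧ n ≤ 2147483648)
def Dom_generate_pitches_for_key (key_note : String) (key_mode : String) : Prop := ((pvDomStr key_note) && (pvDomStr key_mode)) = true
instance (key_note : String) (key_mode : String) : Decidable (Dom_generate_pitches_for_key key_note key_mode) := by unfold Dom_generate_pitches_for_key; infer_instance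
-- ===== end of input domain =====

-- B replaces A's accidental-spelling tables, dead list block and index/slice search by a
-- circle-of-fifths signed count per key, suffix spelling (+"is"/+"es"), and an arithmetic
-- index loop i = 2..26 over the c,..b'' grid (objective: simpler).

-- ===== PORT A =====
-- A-side helper: the key_signatures dict literal of A.
def keySignaturesA : PySem.Dict (String × String) (PySem.Dict String String) :=
  PySem.Dict.ofList [
    (("c", "\\major"), PySem.Dict.ofList []),
    (("g", "\\major"), PySem.Dict.ofList [("f", "fis")]),
    (("d", "\\major"), PySem.Dict.ofList [("f", "fis"), ("c", "cis")]),
    (("a", "\\major"), PySem.Dict.ofList [("f", "fis"), ("c", "cis"), ("g", "gis")]),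
    (("f", "\\major"), PySem.Dict.ofList [("b", "bes")]),
    (("bes", "\\major"), PySem.Dict.ofList [("b", "bes"), ("e", "ees")]),
    (("ees", "\\major"), PySem.Dict.ofList [("b", "bes"), ("e", "ees"), ("a", "aes")]),
    (("e", "\\major"), PySem.Dict.ofList [("f", "fis"), ("c", "cis"), ("g", "gis"), ("d", "dis")]),
    (("a", "\\minor"), PySem.Dict.ofList []),
    (("e", "\\minor"), PySem.Dict.ofList [("f", "fis")]),
    (("b", "\\minor"), PySem.Dict.ofList [("f", "fis"), ("c", "cis")]),
    (("fis", "\\minor"), PySem.Dict.ofList [("f", "fis"), ("c", "cis"), ("g", "gis")]),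
    (("d", "\\minor"), PySem.Dict.ofList [("b", "bes")]),
    (("g", "\\minor"), PySem.Dict.ofList [("b", "bes"), ("e", "ees")]),
    (("c", "\\minor"), PySem.Dict.ofList [("b", "bes"), ("e", "ees"), ("a", "aes")]),
    (("cis", "\\minor"), PySem.Dict.ofList [("f", "fis"), ("c", "cis"), ("g", "gis"), ("d", "dis")])]

def generate_pitches_for_key (key_note : String) (key_mode : String) : List String :=
  let accidentals := keySignaturesA.getD (key_note, key_mode) PySem.Dict.empty
  let base_notes := ["c", "d", "e", "f", "g", "a", "b"]
  -- first (dead) build of all_pitches, overwritten below exactly as in A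
  let all_pitches := ["e", "f", "g", "a", "b"].foldl
    (fun acc note => acc ++ [accidentals.getD note note ++ ","]) []
  let all_pitches := ["", "'"].foldl
    (fun acc octave_mark => base_notes.foldl
      (fun acc note => acc ++ [accidentals.getD note note ++ octave_mark]) acc) all_pitches
  let _ := ["c", "d", "e", "f", "g", "a", "b"].foldl
    (fun acc note => acc ++ [accidentals.getD note note ++ "''"]) all_pitches
  let diatonic_map := base_notes.foldl (fun d n => d.insert n n) (PySem.Dict.empty : PySem.Dict String String)
  let diatonic_map := accidentals.items.foldl (fun d p => d.insert p.1 p.2) diatonic_map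
  let all_pitches := ([",", "", "'", "''"].foldl
    (fun acc mark => ["c", "d", "e", "f", "g", "a", "b"].foldl
      (fun acc note => acc ++ [diatonic_map.getD note note ++ mark]) acc) ([] : List String))
  -- diatonic_map['e'] / ['a']: 'e' and 'a' are always keys (inserted from base_notes), so
  -- Python's [] never raises; .get? … .getD "" is exact here.  Likewise both .index searches
  -- always succeed (the searched pitch is in the list), so .index never raises; index?.getD 0 is exact.
  let start_index := (PySem.List.index? all_pitches ((diatonic_map.get? "e").getD "" ++ ",")).getD 0
  let end_index := (PySem.List.index? all_pitches ((diatonic_map.get? "a").getD "" ++ "''")).getD 0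
  PySem.List.slice all_pitches (some (start_index : Int)) (some ((end_index : Int) + 1))

-- ===== PORT B =====
-- B-side helper: circle-of-fifths signed accidental count per key (positive = sharps, negative = flats).
def altKeyCounts : PySem.Dict (String × String) Int :=
  PySem.Dict.ofList [
    (("c", "\\major"), 0), (("g", "\\major"), 1), (("d", "\\major"), 2), (("a", "\\major"), 3),
    (("e", "\\major"), 4), (("f", "\\major"), -1), (("bes", "\\major"), -2), (("ees", "\\major"), -3),
    (("a", "\\minor"), 0), (("e", "\\minor"), 1), (("b", "\\minor"), 2), (("fis", "\\minor"), 3),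
    (("cis", "\\minor"), 4), (("d", "\\minor"), -1), (("g", "\\minor"), -2), (("c", "\\minor"), -3)]

-- B-side helper: Source B's 'spell' — add "is"/"es" to the notes in the active sharps/flats prefix.
def spellB (sharps : List String) (flats : List String) (n : String) : String :=
  if sharps.contains n then n ++ "is"
  else if flats.contains n then n ++ "es"
  else n

def generate_pitches_for_key_alt (key_note : String) (key_mode : String) : List String :=
  let k := altKeyCounts.getD (key_note, key_mode) 0
  let sharps := if k > 0 then PySem.List.slice ["f", "c", "g", "d", "a", "e", "b"] none (some k) else []
  let flats := if k < 0 then PySem.List.slice ["b", "e", "a", "d", "g"] none (some (-k)) else []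
  let notes := ["c", "d", "e", "f", "g", "a", "b"]
  let marks := [",", "", "'", "''"]
  -- notes[i % 7] and marks[i // 7] are always in range for i = 2..26, so .getD "" is exact.
  (PySem.List.pyRange 2 27 1).map (fun i =>
    spellB sharps flats ((PySem.List.pyGet? notes (PySem.Int.mod i 7)).getD "")
      ++ (PySem.List.pyGet? marks (PySem.Int.floordiv i 7)).getD "")

-- ===== PRECONDITION & SPEC =====
def Spec_generate_pitches_for_key (key_note : String) (key_mode : String) (out : List String) : Prop := out = generate_pitches_for_key_alt key_note key_mode
instance (key_note : String) (key_mode : String) (out : List String) : Decidable (Spec_generate_pitches_for_key key_note key_mode out) := by unfold Spec_generate_pitches_for_key; infer_instance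

-- ===== CLAIM (what is proved, stated in full; the proofs are below) =====
def Claim_equal_generate_pitches_for_key : Prop := ∀ (key_note : String) (key_mode : String), Dom_generate_pitches_for_key key_note key_mode → Spec_generate_pitches_for_key key_note key_mode (generate_pitches_for_key key_note key_mode)

-- ===== LEMMAS AND PROOFS =====

-- the C-major (no accidentals) output, which both ports produce whenever the key is not in the table
def pvCNaturalOut : List String :=
  ["e,", "f,", "g,", "a,", "b,", "c", "d", "e", "f", "g", "a", "b",
   "c'", "d'", "e'", "f'", "g'", "a'", "b'", "c''", "d''", "e''", "f''", "g''", "a''"]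

theorem keySignaturesA_items : keySignaturesA.items = [
    (("c", "\\major"), PySem.Dict.ofList []),
    (("g", "\\major"), PySem.Dict.ofList [("f", "fis")]),
    (("d", "\\major"), PySem.Dict.ofList [("f", "fis"), ("c", "cis")]),
    (("a", "\\major"), PySem.Dict.ofList [("f", "fis"), ("c", "cis"), ("g", "gis")]),
    (("f", "\\major"), PySem.Dict.ofList [("b", "bes")]),
    (("bes", "\\major"), PySem.Dict.ofList [("b", "bes"), ("e", "ees")]),
    (("ees", "\\major"), PySem.Dict.ofList [("b", "bes"), ("e", "ees"), ("a", "aes")]),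
    (("e", "\\major"), PySem.Dict.ofList [("f", "fis"), ("c", "cis"), ("g", "gis"), ("d", "dis")]),
    (("a", "\\minor"), PySem.Dict.ofList []),
    (("e", "\\minor"), PySem.Dict.ofList [("f", "fis")]),
    (("b", "\\minor"), PySem.Dict.ofList [("f", "fis"), ("c", "cis")]),
    (("fis", "\\minor"), PySem.Dict.ofList [("f", "fis"), ("c", "cis"), ("g", "gis")]),
    (("d", "\\minor"), PySem.Dict.ofList [("b", "bes")]),
    (("g", "\\minor"), PySem.Dict.ofList [("b", "bes"), ("e", "ees")]),
    (("c", "\\minor"), PySem.Dict.ofList [("b", "bes"), ("e", "ees"), ("a", "aes")]),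
    (("cis", "\\minor"), PySem.Dict.ofList [("f", "fis"), ("c", "cis"), ("g", "gis"), ("d", "dis")])] := by
  decide

theorem altKeyCounts_items : altKeyCounts.items = [
    (("c", "\\major"), (0:Int)), (("g", "\\major"), 1), (("d", "\\major"), 2), (("a", "\\major"), 3),
    (("e", "\\major"), 4), (("f", "\\major"), -1), (("bes", "\\major"), -2), (("ees", "\\major"), -3),
    (("a", "\\minor"), 0), (("e", "\\minor"), 1), (("b", "\\minor"), 2), (("fis", "\\minor"), 3),
    (("cis", "\\minor"), 4), (("d", "\\minor"), -1), (("g", "\\minor"), -2), (("c", "\\minor"), -3)] := by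
  decide

theorem getA_none (kn km : String)
    (h1 : (kn, km) ≠ ("c", "\\major")) (h2 : (kn, km) ≠ ("g", "\\major"))
    (h3 : (kn, km) ≠ ("d", "\\major")) (h4 : (kn, km) ≠ ("a", "\\major"))
    (h5 : (kn, km) ≠ ("f", "\\major")) (h6 : (kn, km) ≠ ("bes", "\\major"))
    (h7 : (kn, km) ≠ ("ees", "\\major")) (h8 : (kn, km) ≠ ("e", "\\major"))
    (h9 : (kn, km) ≠ ("a", "\\minor")) (h10 : (kn, km) ≠ ("e", "\\minor"))
    (h11 : (kn, km) ≠ ("b", "\\minor")) (h12 : (kn, km) ≠ ("fis", "\\minor"))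
    (h13 : (kn, km) ≠ ("d", "\\minor")) (h14 : (kn, km) ≠ ("g", "\\minor"))
    (h15 : (kn, km) ≠ ("c", "\\minor")) (h16 : (kn, km) ≠ ("cis", "\\minor")) :
    keySignaturesA.get? (kn, km) = none := by
  have e1 : ((("c", "\\major") : String × String) == (kn, km)) = false := by simpa using Ne.symm h1
  have e2 : ((("g", "\\major") : String × String) == (kn, km)) = false := by simpa using Ne.symm h2
  have e3 : ((("d", "\\major") : String × String) == (kn, km)) = false := by simpa using Ne.symm h3
  have e4 : ((("a", "\\major") : String × String) == (kn, km)) = false := by simpa using Ne.symm h4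
  have e5 : ((("f", "\\major") : String × String) == (kn, km)) = false := by simpa using Ne.symm h5
  have e6 : ((("bes", "\\major") : String × String) == (kn, km)) = false := by simpa using Ne.symm h6
  have e7 : ((("ees", "\\major") : String × String) == (kn, km)) = false := by simpa using Ne.symm h7
  have e8 : ((("e", "\\major") : String × String) == (kn, km)) = false := by simpa using Ne.symm h8
  have e9 : ((("a", "\\minor") : String × String) == (kn, km)) = false := by simpa using Ne.symm h9
  have e10 : ((("e", "\\minor") : String × String) == (kn, km)) = false := by simpa using Ne.symm h10
  have e11 : ((("b", "\\minor") : String × String) == (kn, km)) = false := by simpa using Ne.symm h11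
  have e12 : ((("fis", "\\minor") : String × String) == (kn, km)) = false := by simpa using Ne.symm h12
  have e13 : ((("d", "\\minor") : String × String) == (kn, km)) = false := by simpa using Ne.symm h13
  have e14 : ((("g", "\\minor") : String × String) == (kn, km)) = false := by simpa using Ne.symm h14
  have e15 : ((("c", "\\minor") : String × String) == (kn, km)) = false := by simpa using Ne.symm h15
  have e16 : ((("cis", "\\minor") : String × String) == (kn, km)) = false := by simpa using Ne.symm h16
  rw [PySem.Dict.get?, keySignaturesA_items]
  simp [List.find?, e1, e2, e3, e4, e5, e6, e7, e8, e9, e10, e11, e12, e13, e14, e15, e16]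

theorem getAlt_none (kn km : String)
    (h1 : (kn, km) ≠ ("c", "\\major")) (h2 : (kn, km) ≠ ("g", "\\major"))
    (h3 : (kn, km) ≠ ("d", "\\major")) (h4 : (kn, km) ≠ ("a", "\\major"))
    (h5 : (kn, km) ≠ ("f", "\\major")) (h6 : (kn, km) ≠ ("bes", "\\major"))
    (h7 : (kn, km) ≠ ("ees", "\\major")) (h8 : (kn, km) ≠ ("e", "\\major"))
    (h9 : (kn, km) ≠ ("a", "\\minor")) (h10 : (kn, km) ≠ ("e", "\\minor"))
    (h11 : (kn, km) ≠ ("b", "\\minor")) (h12 : (kn, km) ≠ ("fis", "\\minor"))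
    (h13 : (kn, km) ≠ ("d", "\\minor")) (h14 : (kn, km) ≠ ("g", "\\minor"))
    (h15 : (kn, km) ≠ ("c", "\\minor")) (h16 : (kn, km) ≠ ("cis", "\\minor")) :
    altKeyCounts.get? (kn, km) = none := by
  have e1 : ((("c", "\\major") : String × String) == (kn, km)) = false := by simpa using Ne.symm h1
  have e2 : ((("g", "\\major") : String × String) == (kn, km)) = false := by simpa using Ne.symm h2
  have e3 : ((("d", "\\major") : String × String) == (kn, km)) = false := by simpa using Ne.symm h3
  have e4 : ((("a", "\\major") : String × String) == (kn, km)) = false := by simpa using Ne.symm h4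
  have e5 : ((("f", "\\major") : String × String) == (kn, km)) = false := by simpa using Ne.symm h5
  have e6 : ((("bes", "\\major") : String × String) == (kn, km)) = false := by simpa using Ne.symm h6
  have e7 : ((("ees", "\\major") : String × String) == (kn, km)) = false := by simpa using Ne.symm h7
  have e8 : ((("e", "\\major") : String × String) == (kn, km)) = false := by simpa using Ne.symm h8
  have e9 : ((("a", "\\minor") : String × String) == (kn, km)) = false := by simpa using Ne.symm h9
  have e10 : ((("e", "\\minor") : String × String) == (kn, km)) = false := by simpa using Ne.symm h10
  have e11 : ((("b", "\\minor") : String × String) == (kn, km)) = false := by simpa using Ne.symm h11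
  have e12 : ((("fis", "\\minor") : String × String) == (kn, km)) = false := by simpa using Ne.symm h12
  have e13 : ((("d", "\\minor") : String × String) == (kn, km)) = false := by simpa using Ne.symm h13
  have e14 : ((("g", "\\minor") : String × String) == (kn, km)) = false := by simpa using Ne.symm h14
  have e15 : ((("c", "\\minor") : String × String) == (kn, km)) = false := by simpa using Ne.symm h15
  have e16 : ((("cis", "\\minor") : String × String) == (kn, km)) = false := by simpa using Ne.symm h16
  rw [PySem.Dict.get?, altKeyCounts_items]
  simp [List.find?, e1, e2, e3, e4, e5, e6, e7, e8, e9, e10, e11, e12, e13, e14, e15, e16]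

theorem portA_of_none (kn km : String) (h : keySignaturesA.get? (kn, km) = none) :
    generate_pitches_for_key kn km = pvCNaturalOut := by
  simp only [generate_pitches_for_key, PySem.Dict.getD_eq_get?_getD, h]
  decide

theorem portB_of_none (kn km : String) (h : altKeyCounts.get? (kn, km) = none) :
    generate_pitches_for_key_alt kn km = pvCNaturalOut := by
  simp only [generate_pitches_for_key_alt, PySem.Dict.getD_eq_get?_getD, h]
  decide

-- ===== VERDICT (by name: the statement is the Claim_ definition above) =====
theorem generate_pitches_for_key_spec : Claim_equal_generate_pitches_for_key := by
  unfold Claim_equal_generate_pitches_for_key Spec_generate_pitches_for_key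
  intro kn km _
  by_cases h1 : (kn, km) = ("c", "\\major")
  · rw [Prod.mk.injEq] at h1; obtain ⟨rfl, rfl⟩ := h1; decide
  by_cases h2 : (kn, km) = ("g", "\\major")
  · rw [Prod.mk.injEq] at h2; obtain ⟨rfl, rfl⟩ := h2; decide
  by_cases h3 : (kn, km) = ("d", "\\major")
  · rw [Prod.mk.injEq] at h3; obtain ⟨rfl, rfl⟩ := h3; decide
  by_cases h4 : (kn, km) = ("a", "\\major")
  · rw [Prod.mk.injEq] at h4; obtain ⟨rfl, rfl⟩ := h4; decide
  by_cases h5 : (kn, km) = ("f", "\\major")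
  · rw [Prod.mk.injEq] at h5; obtain ⟨rfl, rfl⟩ := h5; decide
  by_cases h6 : (kn, km) = ("bes", "\\major")
  · rw [Prod.mk.injEq] at h6; obtain ⟨rfl, rfl⟩ := h6; decide
  by_cases h7 : (kn, km) = ("ees", "\\major")
  · rw [Prod.mk.injEq] at h7; obtain ⟨rfl, rfl⟩ := h7; decide
  by_cases h8 : (kn, km) = ("e", "\\major")
  · rw [Prod.mk.injEq] at h8; obtain ⟨rfl, rfl⟩ := h8; decide
  by_cases h9 : (kn, km) = ("a", "\\minor")
  · rw [Prod.mk.injEq] at h9; obtain ⟨rfl, rfl⟩ := h9; decide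
  by_cases h10 : (kn, km) = ("e", "\\minor")
  · rw [Prod.mk.injEq] at h10; obtain ⟨rfl, rfl⟩ := h10; decide
  by_cases h11 : (kn, km) = ("b", "\\minor")
  · rw [Prod.mk.injEq] at h11; obtain ⟨rfl, rfl⟩ := h11; decide
  by_cases h12 : (kn, km) = ("fis", "\\minor")
  · rw [Prod.mk.injEq] at h12; obtain ⟨rfl, rfl⟩ := h12; decide
  by_cases h13 : (kn, km) = ("d", "\\minor")
  · rw [Prod.mk.injEq] at h13; obtain ⟨rfl, rfl⟩ := h13; decide
  by_cases h14 : (kn, km) = ("g", "\\minor")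
  · rw [Prod.mk.injEq] at h14; obtain ⟨rfl, rfl⟩ := h14; decide
  by_cases h15 : (kn, km) = ("c", "\\minor")
  · rw [Prod.mk.injEq] at h15; obtain ⟨rfl, rfl⟩ := h15; decide
  by_cases h16 : (kn, km) = ("cis", "\\minor")
  · rw [Prod.mk.injEq] at h16; obtain ⟨rfl, rfl⟩ := h16; decide
  rw [portA_of_none kn km (getA_none kn km h1 h2 h3 h4 h5 h6 h7 h8 h9 h10 h11 h12 h13 h14 h15 h16),
      portB_of_none kn km (getAlt_none kn km h1 h2 h3 h4 h5 h6 h7 h8 h9 h10 h11 h12 h13 h14 h15 h16)]
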